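-- pv_equiv track=rewrite | github.com/LukasHrdy11/OV-2024- | parametrs.py | najit_ustalene_x
-- ===== SOURCE A (Python) =====
-- def najit_ustalene_x(energie, tolerance):
--     ustalene_x = []
--     ustaleni_x = None
--
--     for i in range(1, len(energie)):
--         change = abs(energie[i] - energie[i - 1])
--         if change <= tolerance and ustaleni_x is None:
--             ustaleni_x = i
--         elif change > tolerance and ustaleni_x is not None:
--             ustalene_x.append(ustaleni_x)
--             ustaleni_x = None
--
--     if ustaleni_x is not None:
--         ustalene_x.append(ustaleni_x)
--
--     return ustalene_x
-- ===== SOURCE B (Python) =====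
-- def najit_ustalene_x(energie, tolerance):
--     # two-phase: build the stability table, then emit the start of each maximal stable run
--     flags = [abs(energie[i] - energie[i - 1]) <= tolerance for i in range(1, len(energie))]
--     return [i + 1 for i, f in enumerate(flags) if f and (i == 0 or not flags[i - 1])]
-- ===== Notes on version B (the rewrite author's own statement) =====
-- stated objective: alternative
-- what changed: Replaced A's one-pass sentinel state machine (ustaleni_x None/not-None) with a two-phase build-then-scan: first a boolean stability table, then run starts selected by the closed predicate flags[i] and (i==0 or not flags[i-1]).
import Mathlib
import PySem

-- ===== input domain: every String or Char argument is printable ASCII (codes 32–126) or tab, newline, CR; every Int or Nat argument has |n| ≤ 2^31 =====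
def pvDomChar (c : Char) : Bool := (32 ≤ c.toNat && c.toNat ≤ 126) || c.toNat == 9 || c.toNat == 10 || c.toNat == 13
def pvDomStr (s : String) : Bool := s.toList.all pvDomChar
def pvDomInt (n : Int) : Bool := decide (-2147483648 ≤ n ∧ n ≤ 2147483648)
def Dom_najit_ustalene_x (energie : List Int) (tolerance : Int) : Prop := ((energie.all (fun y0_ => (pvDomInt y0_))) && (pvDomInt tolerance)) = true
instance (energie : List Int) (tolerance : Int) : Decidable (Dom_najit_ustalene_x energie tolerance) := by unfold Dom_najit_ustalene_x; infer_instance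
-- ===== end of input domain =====

-- B replaces A's sentinel state machine with a build-then-scan two-phase decomposition; same cost, no behaviour change.

-- ===== PORT A =====
def najit_ustalene_x (energie : List Int) (tolerance : Int) : List Int :=
  let st := (PySem.List.pyRange 1 (energie.length : Int) 1).foldl
    (fun (st : List Int × Option Int) i =>
      let change := |PySem.List.pyGetD energie i 0 - PySem.List.pyGetD energie (i - 1) 0|
      if change ≤ tolerance ∧ st.2 = none then (st.1, some i)
      else if tolerance < change ∧ st.2 ≠ none then (st.1 ++ [st.2.getD 0], none)
      else st)
    ([], none)
  match st.2 with
  | some v => st.1 ++ [v]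
  | none => st.1

-- ===== PORT B =====
def najit_ustalene_x_alt (energie : List Int) (tolerance : Int) : List Int :=
  let flags := (PySem.List.pyRange 1 (energie.length : Int) 1).map
    (fun i => decide (|PySem.List.pyGetD energie i 0 - PySem.List.pyGetD energie (i - 1) 0| ≤ tolerance))
  ((PySem.List.enumerate flags 0).filter
    (fun p => p.2 && ((p.1 == 0) || !(PySem.List.pyGetD flags (p.1 - 1) false)))).map
    (fun p => p.1 + 1)

-- ===== PRECONDITION & SPEC =====
def Spec_najit_ustalene_x (energie : List Int) (tolerance : Int) (out : List Int) : Prop := out = najit_ustalene_x_alt energie tolerance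
instance (energie : List Int) (tolerance : Int) (out : List Int) : Decidable (Spec_najit_ustalene_x energie tolerance out) := by unfold Spec_najit_ustalene_x; infer_instance

-- ===== CLAIM (what is proved, stated in full; the proofs are below) =====
def Claim_equal_najit_ustalene_x : Prop := ∀ (energie : List Int) (tolerance : Int), Dom_najit_ustalene_x energie tolerance → Spec_najit_ustalene_x energie tolerance (najit_ustalene_x energie tolerance)

-- ===== LEMMAS AND PROOFS =====

-- common recursive description: run starts of a flag list, given the previous flag and the current position
def pvCore : List Bool → Bool → Int → List Int
  | [], _, _ => []
  | f :: fs, prev, i => (if f && !prev then [i] else []) ++ pvCore fs f (i + 1)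

-- A's loop body, abstracted over the (index, flag) pair
def pvStep (st : List Int × Option Int) (p : Int × Bool) : List Int × Option Int :=
  if p.2 = true ∧ st.2 = none then (st.1, some p.1)
  else if p.2 = false ∧ st.2 ≠ none then (st.1 ++ [st.2.getD 0], none)
  else st

def pvFinalize (st : List Int × Option Int) : List Int :=
  match st.2 with
  | some v => st.1 ++ [v]
  | none => st.1

lemma pvA1 (fs : List Bool) : ∀ (s : Int) (acc : List Int) (o : Option Int),
    pvFinalize ((PySem.List.enumerate fs s).foldl pvStep (acc, o))
      = acc ++ o.toList ++ pvCore fs o.isSome s := by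
  induction fs with
  | nil => intro s acc o; cases o <;> simp [pvFinalize, pvCore, PySem.List.enumerate_nil]
  | cons f fs ih =>
    intro s acc o
    rw [PySem.List.enumerate_cons, List.foldl_cons]
    cases o <;> cases f <;>
      simp [pvStep, pvCore, ih, List.append_assoc]

lemma pvEnumMapRange (F : Int → Bool) : ∀ (n : Nat) (a : Int),
    PySem.List.enumerate ((PySem.List.pyRange a (a + n) 1).map F) a
      = (PySem.List.pyRange a (a + n) 1).map (fun i => (i, F i)) := by
  intro n
  induction n with
  | zero => intro a; simp [PySem.List.pyRange_one_eq_nil, PySem.List.enumerate_nil]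
  | succ m ih =>
    intro a
    rw [PySem.List.pyRange_one_cons (by omega)]
    have h : (a : Int) + (m + 1 : Nat) = (a + 1) + (m : Nat) := by omega
    simp only [List.map_cons, PySem.List.enumerate_cons, h, ih (a + 1)]

lemma pvB1 (fs : List Bool) : ∀ (pre : List Bool),
    ((PySem.List.enumerate fs (pre.length : Int)).filter
        (fun p => p.2 && ((p.1 == 0) || !(PySem.List.pyGetD (pre ++ fs) (p.1 - 1) false)))).map
        (fun p => p.1 + 1)
      = pvCore fs (pre.getLastD false) ((pre.length : Int) + 1) := by
  induction fs with
  | nil => intro pre; simp [pvCore, PySem.List.enumerate_nil]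
  | cons f fs ih =>
    intro pre
    rw [PySem.List.enumerate_cons, List.filter_cons]
    have hpp : pre ++ f :: fs = (pre ++ [f]) ++ fs := by simp
    have htail := ih (pre ++ [f])
    rw [hpp]
    have hlen : ((pre ++ [f]).length : Int) = (pre.length : Int) + 1 := by simp
    rw [hlen] at htail
    have hcond : (f && (((pre.length : Int) == 0) ||
        !(PySem.List.pyGetD ((pre ++ [f]) ++ fs) ((pre.length : Int) - 1) false)))
        = (f && !(pre.getLastD false)) := by
      cases pre with
      | nil => simp
      | cons q qs =>
        have h1 : ((((q :: qs).length : Int)) == 0) = false := by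
          simp only [beq_eq_false_iff_ne, ne_eq, List.length_cons]
          omega
        have hidx : ((q :: qs).length : Int) - 1 = (((q :: qs).length - 1 : Nat) : Int) := by
          simp only [List.length_cons]
          omega
        have h2 : PySem.List.pyGetD (((q :: qs) ++ [f]) ++ fs) (((q :: qs).length : Int) - 1) false
            = (q :: qs).getLastD false := by
          rw [hidx, PySem.List.pyGetD_natCast]
          rw [List.append_assoc, List.getD_append _ _ _ _ (by simp)]
          rw [List.getLastD_eq_getLast?, List.getLast?_eq_getElem?]
          simp [List.getD]
        rw [h1, h2]
        simp
    have hlast : (pre ++ [f]).getLastD false = f := by simp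
    rw [hlast] at htail
    rw [hcond]
    rw [show pvCore (f :: fs) (pre.getLastD false) ((pre.length : Int) + 1)
        = (if f && !(pre.getLastD false) then [(pre.length : Int) + 1] else [])
          ++ pvCore fs f ((pre.length : Int) + 1 + 1) from rfl]
    cases hf : (f && !(pre.getLastD false))
    · rw [if_neg (by exact Bool.false_ne_true), if_neg (by exact Bool.false_ne_true),
        List.nil_append]
      exact htail
    · rw [if_pos rfl, if_pos rfl, List.map_cons, List.singleton_append, htail]

lemma pvFlags_eq (energie : List Int) (tolerance : Int) :
    najit_ustalene_x energie tolerance = najit_ustalene_x_alt energie tolerance := by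
  set F : Int → Bool :=
    fun i => decide (|PySem.List.pyGetD energie i 0 - PySem.List.pyGetD energie (i - 1) 0| ≤ tolerance) with hF
  have hbody :
      (fun (st : List Int × Option Int) (i : Int) =>
        let change := |PySem.List.pyGetD energie i 0 - PySem.List.pyGetD energie (i - 1) 0|
        if change ≤ tolerance ∧ st.2 = none then (st.1, some i)
        else if tolerance < change ∧ st.2 ≠ none then (st.1 ++ [st.2.getD 0], none)
        else st)
      = (fun st i => pvStep st (i, F i)) := by
    funext st i
    simp only [pvStep, hF, decide_eq_true_eq, decide_eq_false_iff_not, not_le]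
  -- rewrite the range into the canonical a + n form
  have hA : najit_ustalene_x energie tolerance
      = pvFinalize (((PySem.List.pyRange 1 (energie.length : Int) 1).map
          (fun i => (i, F i))).foldl pvStep ([], none)) := by
    unfold najit_ustalene_x
    rw [hbody, ← List.foldl_map]
    rfl
  have hB : najit_ustalene_x_alt energie tolerance
      = ((PySem.List.enumerate ((PySem.List.pyRange 1 (energie.length : Int) 1).map F) 0).filter
          (fun p => p.2 && ((p.1 == 0) ||
            !(PySem.List.pyGetD ((PySem.List.pyRange 1 (energie.length : Int) 1).map F) (p.1 - 1) false)))).map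
          (fun p => p.1 + 1) := rfl
  have hBcore := pvB1 ((PySem.List.pyRange 1 (energie.length : Int) 1).map F) []
  simp only [List.length_nil, Int.ofNat_zero, List.nil_append, List.getLastD_nil] at hBcore
  rcases Nat.eq_zero_or_pos energie.length with h0 | hpos
  · -- empty or handled uniformly below via the canonical form; length = 0 gives empty range
    have hr : PySem.List.pyRange 1 (energie.length : Int) 1 = [] := by
      apply PySem.List.pyRange_one_eq_nil; omega
    rw [hA, hB, hr]
    simp [pvFinalize, PySem.List.enumerate_nil]
  · have hn : (energie.length : Int) = 1 + ((energie.length - 1 : Nat) : Int) := by omega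
    have hEnum := pvEnumMapRange F (energie.length - 1) 1
    rw [← hn] at hEnum
    rw [hA, hB, ← hEnum, pvA1]
    rw [hBcore]
    simp [Option.toList]

-- ===== VERDICT (by name: the statement is the Claim_ definition above) =====
theorem najit_ustalene_x_spec : Claim_equal_najit_ustalene_x := by
  intro energie tolerance _
  unfold Spec_najit_ustalene_x
  exact pvFlags_eq energie tolerance
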